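-- pv_equiv track=rewrite | github.com/kishdubey/ITI1120 | lab4-students/prog_solved_v2.py | mess
-- ===== SOURCE A (Python) =====
-- def mess(phrase):
--      acc=''
--      for char in phrase:
--           if char in "rstvwxyz":
--                acc = acc + char.upper()
--                #phrase = phrase.replace(char, char.upper())
--           elif char in " ":
--                acc = acc + "-"
--                #phrase = phrase.replace(char, "-")
--           else:
--                acc = acc + char
--      return acc
-- ===== SOURCE B (Python) =====
-- def mess(phrase):
--     # Staged whole-string rewriting: one replace pass per special lowercase
--     # letter, then one pass turning spaces into dashes.  Correct because each
--     # pass only introduces characters (uppercase letters, '-') that no later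
--     # pass rewrites.
--     for ch in "rstvwxyz":
--         phrase = phrase.replace(ch, ch.upper())
--     return phrase.replace(" ", "-")
-- ===== Notes on version B (the rewrite author's own statement) =====
-- stated objective: faster
-- what changed: Replaces A's single per-character if/elif/else loop with quadratic string concatenation by nine staged whole-string str.replace passes (one per special letter, one for space), correct because no pass's output characters are rewritten by a later pass.
import Mathlib
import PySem

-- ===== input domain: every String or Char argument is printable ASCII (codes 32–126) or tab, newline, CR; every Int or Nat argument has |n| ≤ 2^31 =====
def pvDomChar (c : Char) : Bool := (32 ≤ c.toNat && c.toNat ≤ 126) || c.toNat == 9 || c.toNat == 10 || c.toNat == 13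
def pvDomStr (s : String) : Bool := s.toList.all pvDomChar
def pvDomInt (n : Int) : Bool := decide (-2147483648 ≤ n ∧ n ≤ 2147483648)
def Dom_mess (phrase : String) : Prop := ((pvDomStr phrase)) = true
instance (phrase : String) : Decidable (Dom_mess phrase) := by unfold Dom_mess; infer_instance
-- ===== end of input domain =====

-- B replaces A's single branching accumulator pass (quadratic string concatenation) by nine
-- staged whole-string replace passes (one per special letter, then one for space); measured faster.

-- ===== PORT A =====
-- acc = ''; for char in phrase: branch on membership, append; return acc
def mess (phrase : String) : String :=
  String.ofList (phrase.toList.foldl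
    (fun acc c =>
      if PySem.Chars.isIn [c] "rstvwxyz".toList then acc ++ [PySem.Chars.upperChar c]
      else if PySem.Chars.isIn [c] " ".toList then acc ++ ['-']
      else acc ++ [c])
    [])

-- ===== PORT B =====
-- for ch in "rstvwxyz": phrase = phrase.replace(ch, ch.upper()); return phrase.replace(" ", "-")
def mess_alt (phrase : String) : String :=
  PySem.Str.replace
    ("rstvwxyz".toList.foldl
      (fun p ch => PySem.Str.replace p (String.ofList [ch]) (String.ofList [PySem.Chars.upperChar ch]))
      phrase)
    " " "-"

-- ===== PRECONDITION & SPEC =====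
def Spec_mess (phrase : String) (out : String) : Prop := out = mess_alt phrase
instance (phrase : String) (out : String) : Decidable (Spec_mess phrase out) := by unfold Spec_mess; infer_instance

-- ===== CLAIM (what is proved, stated in full; the proofs are below) =====
def Claim_equal_mess : Prop := ∀ (phrase : String), Dom_mess phrase → Spec_mess phrase (mess phrase)

-- ===== LEMMAS AND PROOFS =====

-- a single-character replace is a character-wise map
theorem replace_go_single (a b : Char) (l acc : List Char) (fuel : Nat) (h : l.length ≤ fuel) :
    PySem.Chars.replace.go [a] [b] fuel l acc =
      acc.reverse ++ l.map (fun c => if c = a then b else c) := by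
  induction l generalizing acc fuel with
  | nil =>
    cases fuel <;> simp [PySem.Chars.replace.go]
  | cons c t ih =>
    cases fuel with
    | zero => simp at h
    | succ f =>
      simp only [List.length_cons, Nat.succ_le_succ_iff] at h
      by_cases hc : c = a
      · subst hc
        have hpre : [c].isPrefixOf (c :: t) = true := by
          simp [List.isPrefixOf]
        simp only [PySem.Chars.replace.go, hpre, if_true]
        rw [show List.drop [c].length (c :: t) = t from rfl, ih _ _ h]
        simp
      · have hpre : [a].isPrefixOf (c :: t) = false := by
          simp [List.isPrefixOf]
          exact fun hh => (hc hh.symm).elim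
        simp only [PySem.Chars.replace.go, hpre, Bool.false_eq_true, if_false]
        rw [ih _ _ h]
        simp [hc]

theorem replace_single (a b : Char) (s : List Char) :
    PySem.Chars.replace s [a] [b] = s.map (fun c => if c = a then b else c) := by
  unfold PySem.Chars.replace
  simp only [List.isEmpty_cons, Bool.false_eq_true, if_false]
  exact replace_go_single a b s [] s.length (le_refl _)

-- the full character-wise translation performed by B's nine passes
def messB_char (c : Char) : Char :=
  (fun v => if v = ' ' then '-' else v)
    ("rstvwxyz".toList.foldl (fun v ch => if v = ch then PySem.Chars.upperChar ch else v) c)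

-- a run of single-character replace passes acts character-wise
theorem foldl_replace_map (cs : List Char) (p : String) :
    (cs.foldl
        (fun p ch => PySem.Str.replace p (String.ofList [ch]) (String.ofList [PySem.Chars.upperChar ch]))
        p).toList =
      p.toList.map (fun c => cs.foldl (fun v ch => if v = ch then PySem.Chars.upperChar ch else v) c) := by
  induction cs generalizing p with
  | nil => simp
  | cons ch cs ih =>
    simp only [List.foldl_cons]
    rw [ih]
    simp only [PySem.Str.replace, String.toList_ofList]
    rw [replace_single, List.map_map]
    rfl

theorem mess_alt_toList (phrase : String) :
    (mess_alt phrase).toList = phrase.toList.map messB_char := by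
  unfold mess_alt
  rw [PySem.Str.toList_replace]
  rw [foldl_replace_map]
  rw [show (" " : String).toList = [' '] from rfl, show ("-" : String).toList = ['-'] from rfl]
  rw [replace_single, List.map_map]
  simp only [Function.comp_def]
  exact List.map_congr_left fun c _ => by simp only [messB_char]

-- pointwise agreement of A's branch with B's composed translation
theorem mess_char_eq (c : Char) :
    (if PySem.Chars.isIn [c] "rstvwxyz".toList then PySem.Chars.upperChar c
     else if PySem.Chars.isIn [c] " ".toList then '-'
     else c) = messB_char c := by
  by_cases h1 : c = 'r'; · subst h1; decide
  by_cases h2 : c = 's'; · subst h2; decide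
  by_cases h3 : c = 't'; · subst h3; decide
  by_cases h4 : c = 'v'; · subst h4; decide
  by_cases h5 : c = 'w'; · subst h5; decide
  by_cases h6 : c = 'x'; · subst h6; decide
  by_cases h7 : c = 'y'; · subst h7; decide
  by_cases h8 : c = 'z'; · subst h8; decide
  by_cases h9 : c = ' '
  · subst h9; decide
  have hin : PySem.Chars.isIn [c] "rstvwxyz".toList = false := by
    rw [PySem.Chars.isIn_eq_false_iff]
    intro h
    have : c ∈ "rstvwxyz".toList := h.mem (by simp)
    simp at this
    rcases this with h|h|h|h|h|h|h|h <;> simp_all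
  have hsp : PySem.Chars.isIn [c] " ".toList = false := by
    rw [PySem.Chars.isIn_eq_false_iff]
    intro h
    have : c ∈ " ".toList := h.mem (by simp)
    simp at this
    exact h9 this
  simp only [hin, hsp, Bool.false_eq_true, if_false]
  simp [messB_char, h1, h2, h3, h4, h5, h6, h7, h8, h9]

-- ===== VERDICT (by name: the statement is the Claim_ definition above) =====
theorem mess_spec : Claim_equal_mess := by
  intro phrase _
  unfold Spec_mess
  have key : ∀ (l : List Char) (acc : List Char),
      l.foldl
        (fun acc c =>
          if PySem.Chars.isIn [c] "rstvwxyz".toList then acc ++ [PySem.Chars.upperChar c]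
          else if PySem.Chars.isIn [c] " ".toList then acc ++ ['-']
          else acc ++ [c]) acc =
      acc ++ l.map (fun c =>
        if PySem.Chars.isIn [c] "rstvwxyz".toList then PySem.Chars.upperChar c
        else if PySem.Chars.isIn [c] " ".toList then '-'
        else c) := by
    intro l
    induction l with
    | nil => intro acc; simp
    | cons c t ih =>
      intro acc
      simp only [List.foldl_cons, List.map_cons]
      split_ifs with h1 h2 <;> rw [ih] <;> simp
  have : (mess phrase).toList = (mess_alt phrase).toList := by
    unfold mess
    rw [String.toList_ofList, key, List.nil_append, mess_alt_toList]
    exact List.map_congr_left (fun c _ => mess_char_eq c)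
  exact String.toList_injective this
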